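-- pv_equiv track=rewrite | github.com/MacKenzieOBrian/NLtoSQL | nl2sql/agent_utils.py | _explicit_field_list
-- ===== SOURCE A (Python) =====
-- _FIELD_SYNONYMS = {
--     "msrp": "MSRP",
--     "msrps": "MSRP",
--     "product code": "productCode",
--     "product codes": "productCode",
--     "product name": "productName",
--     "product names": "productName",
--     "product line": "productLine",
--     "order number": "orderNumber",
--     "order date": "orderDate",
--     "order dates": "orderDate",
--     "customer name": "customerName",
--     "customer number": "customerNumber",
--     "credit limit": "creditLimit",
--     "phone": "phone",
--     "city": "city",
--     "country": "country",
--     "state": "state",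
--     "postal code": "postalCode",
--     "zip": "postalCode",
--     "payment date": "paymentDate",
--     "payment dates": "paymentDate",
--     "check number": "checkNumber",
--     "check numbers": "checkNumber",
--     "office code": "officeCode",
--     "employee number": "employeeNumber",
--     "first name": "firstName",
--     "last name": "lastName",
--     "status": "status",
--     "comments": "comments",
--     "amount": "amount",
-- }
--
-- _SPECIAL_FIELD_HINTS = {
--     "codes": ("productCode", ["product"]),
-- }
--
-- def _explicit_field_list(nlq: str) -> list[str]:
--     """
--     Extract an explicit field list in NLQ order when the question enumerates fields
--     (e.g., \"names, codes, and MSRPs\" or \"with city and country\").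
--     """
--     nl = (nlq or "").lower()
--     # Require an enumeration cue to avoid treating filter fields as projections.
--     if not ("," in nl or " and " in nl or nl.startswith(("show", "list", "give", "display"))):
--         return []
--
--     hits = []
--     for k, col in _FIELD_SYNONYMS.items():
--         idx = nl.find(k)
--         if idx != -1:
--             hits.append((idx, col))
--     for k, (col, ctx) in _SPECIAL_FIELD_HINTS.items():
--         idx = nl.find(k)
--         if idx != -1 and any(c in nl for c in ctx):
--             hits.append((idx, col))
--     if not hits:
--         return []
--     hits.sort(key=lambda x: x[0])
--     ordered = []
--     for _, col in hits:
--         if col not in ordered: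
--             ordered.append(col)
--     return ordered
-- ===== SOURCE B (Python) =====
-- _FIELD_SYNONYMS = {
--     "msrp": "MSRP",
--     "msrps": "MSRP",
--     "product code": "productCode",
--     "product codes": "productCode",
--     "product name": "productName",
--     "product names": "productName",
--     "product line": "productLine",
--     "order number": "orderNumber",
--     "order date": "orderDate",
--     "order dates": "orderDate",
--     "customer name": "customerName",
--     "customer number": "customerNumber",
--     "credit limit": "creditLimit",
--     "phone": "phone",
--     "city": "city",
--     "country": "country",
--     "state": "state",
--     "postal code": "postalCode",
--     "zip": "postalCode",
--     "payment date": "paymentDate",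
--     "payment dates": "paymentDate",
--     "check number": "checkNumber",
--     "check numbers": "checkNumber",
--     "office code": "officeCode",
--     "employee number": "employeeNumber",
--     "first name": "firstName",
--     "last name": "lastName",
--     "status": "status",
--     "comments": "comments",
--     "amount": "amount",
-- }
--
-- _SPECIAL_FIELD_HINTS = {
--     "codes": ("productCode", ["product"]),
-- }
--
--
-- def _explicit_field_list(nlq: str) -> list[str]:
--     """Single ordered left-to-right scan: at each position try every key, appending
--     a key's column on a match unless that column was already collected.  No per-key
--     find() pass, no hit list and no sort: scanning positions in order already yields
--     the columns ordered by their earliest mention."""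
--     nl = (nlq or "").lower()
--     if not ("," in nl or " and " in nl or nl.startswith(("show", "list", "give", "display"))):
--         return []
--     ordered = []
--     for i in range(len(nl)):
--         for k, col in _FIELD_SYNONYMS.items():
--             if nl[i:i + len(k)] == k and col not in ordered:
--                 ordered.append(col)
--         for k, (col, ctx) in _SPECIAL_FIELD_HINTS.items():
--             if nl[i:i + len(k)] == k and any(c in nl for c in ctx) and col not in ordered:
--                 ordered.append(col)
--     return ordered
-- ===== Notes on version B (the rewrite author's own statement) =====
-- stated objective: alternative
-- what changed: Replaces the per-key find() pass plus explicit sort-by-index and final dedup loop with a single ordered left-to-right scan of the text that tries every key at each position and appends a key's column on a match unless already collected, so no hit list, no sort and no separate dedup pass are needed.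
import Mathlib
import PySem

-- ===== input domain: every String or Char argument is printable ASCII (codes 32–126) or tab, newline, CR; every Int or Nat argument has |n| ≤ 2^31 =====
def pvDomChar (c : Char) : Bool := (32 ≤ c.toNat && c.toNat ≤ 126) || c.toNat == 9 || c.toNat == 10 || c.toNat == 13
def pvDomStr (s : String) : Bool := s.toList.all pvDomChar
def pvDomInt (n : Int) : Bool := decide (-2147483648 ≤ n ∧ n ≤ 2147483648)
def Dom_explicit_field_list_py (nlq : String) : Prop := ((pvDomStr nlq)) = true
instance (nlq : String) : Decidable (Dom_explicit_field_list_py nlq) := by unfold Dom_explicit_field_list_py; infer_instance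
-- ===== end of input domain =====

-- B replaces A's per-key find() pass + sort-by-index + dedup pass with one ordered
-- left-to-right scan appending each matched key's column when first seen (objective: alternative).

-- ===== PORT A =====
-- the module constant _FIELD_SYNONYMS, as an association list in dict insertion order
def pvFieldSynonyms : List (String × String) :=
  [("msrp", "MSRP"), ("msrps", "MSRP"),
   ("product code", "productCode"), ("product codes", "productCode"),
   ("product name", "productName"), ("product names", "productName"),
   ("product line", "productLine"),
   ("order number", "orderNumber"), ("order date", "orderDate"), ("order dates", "orderDate"),
   ("customer name", "customerName"), ("customer number", "customerNumber"),
   ("credit limit", "creditLimit"),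
   ("phone", "phone"), ("city", "city"), ("country", "country"), ("state", "state"),
   ("postal code", "postalCode"), ("zip", "postalCode"),
   ("payment date", "paymentDate"), ("payment dates", "paymentDate"),
   ("check number", "checkNumber"), ("check numbers", "checkNumber"),
   ("office code", "officeCode"), ("employee number", "employeeNumber"),
   ("first name", "firstName"), ("last name", "lastName"),
   ("status", "status"), ("comments", "comments"), ("amount", "amount")]

-- the module constant _SPECIAL_FIELD_HINTS
def pvSpecialHints : List (String × (String × List String)) :=
  [("codes", ("productCode", ["product"]))]

def explicit_field_list_py (nlq : String) : List String :=
  let nl := PySem.Str.lower (if nlq == "" then "" else nlq)  -- (nlq or "").lower(): '' or "" is ""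
  if ¬ (PySem.Str.isIn "," nl ∨ PySem.Str.isIn " and " nl ∨
        PySem.Str.startswith nl "show" ∨ PySem.Str.startswith nl "list" ∨
        PySem.Str.startswith nl "give" ∨ PySem.Str.startswith nl "display") then
    []
  else
    let hits : List (Int × String) :=
      pvFieldSynonyms.foldl (fun hits kc =>
        let idx := PySem.Str.find nl kc.1
        if idx ≠ -1 then hits ++ [(idx, kc.2)] else hits) []
    let hits :=
      pvSpecialHints.foldl (fun hits kcc =>
        let idx := PySem.Str.find nl kcc.1
        if idx ≠ -1 ∧ (kcc.2.2.any fun c => PySem.Str.isIn c nl) then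
          hits ++ [(idx, kcc.2.1)] else hits) hits
    if hits = [] then []
    else
      let sortedHits := PySem.List.sorted hits (fun x => x.1) false
      sortedHits.foldl (fun ordered ic =>
        if ic.2 ∉ ordered then ordered ++ [ic.2] else ordered) []

-- ===== PORT B =====
def explicit_field_list_py_alt (nlq : String) : List String :=
  let nl := PySem.Str.lower (if nlq == "" then "" else nlq)
  if ¬ (PySem.Str.isIn "," nl ∨ PySem.Str.isIn " and " nl ∨
        PySem.Str.startswith nl "show" ∨ PySem.Str.startswith nl "list" ∨
        PySem.Str.startswith nl "give" ∨ PySem.Str.startswith nl "display") then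
    []
  else
    (PySem.List.pyRange 0 (PySem.Str.len nl) 1).foldl (fun ordered i =>
      let ordered := pvFieldSynonyms.foldl (fun o kc =>
        if PySem.Str.slice nl (some i) (some (i + (PySem.Str.len kc.1 : Int))) = kc.1 ∧ kc.2 ∉ o then
          o ++ [kc.2] else o) ordered
      pvSpecialHints.foldl (fun o kcc =>
        if PySem.Str.slice nl (some i) (some (i + (PySem.Str.len kcc.1 : Int))) = kcc.1 ∧
           (kcc.2.2.any fun c => PySem.Str.isIn c nl) ∧ kcc.2.1 ∉ o then
          o ++ [kcc.2.1] else o) ordered) []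

-- ===== PRECONDITION & SPEC =====
def Spec_explicit_field_list_py (nlq : String) (out : List String) : Prop := out = explicit_field_list_py_alt nlq
instance (nlq : String) (out : List String) : Decidable (Spec_explicit_field_list_py nlq out) := by unfold Spec_explicit_field_list_py; infer_instance

-- ===== CLAIM (what is proved, stated in full; the proofs are below) =====
def Claim_equal_explicit_field_list_py : Prop := ∀ (nlq : String), Dom_explicit_field_list_py nlq → Spec_explicit_field_list_py nlq (explicit_field_list_py nlq)

-- ===== LEMMAS AND PROOFS =====

-- proof-side views of the two programs, over List Char keys
def pvSyn : List (List Char × String) := pvFieldSynonyms.map (fun p => (p.1.toList, p.2))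

def pvKeys (ctx : Bool) : List (List Char × String) :=
  pvSyn ++ (if ctx then [("codes".toList, "productCode")] else [])

def pvHits (s : List Char) (ks : List (List Char × String)) : List (Int × String) :=
  (ks.filter (fun p => decide (PySem.Chars.find s p.1 ≠ -1))).map
    (fun p => (PySem.Chars.find s p.1, p.2))

def pvBlock (s : List Char) (ks : List (List Char × String)) (i : Nat) : List (Int × String) :=
  (ks.filter (fun p => decide (PySem.Chars.find s p.1 = (i : Int)))).map
    (fun p => ((i : Int), p.2))

def pvFirsts (s : List Char) (ks : List (List Char × String)) : List (Int × String) :=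
  (List.range s.length).flatMap (pvBlock s ks)

def pvEvStep (s : List Char) (ks : List (List Char × String)) (o : List String) (i : Nat) :
    List String :=
  ks.foldl (fun o p => if p.1 <+: s.drop i then PySem.Set.add o p.2 else o) o

def pvFsStep (s : List Char) (ks : List (List Char × String)) (o : List String) (i : Nat) :
    List String :=
  ks.foldl (fun o p => if PySem.Chars.find s p.1 = (i : Int) then PySem.Set.add o p.2 else o) o

def pvScan (s : List Char) (ks : List (List Char × String)) : List String :=
  (List.range s.length).foldl (pvEvStep s ks) []

-- elementary facts about Chars.find (first occurrence)
lemma pvFindLe (s k : List Char) (i : Nat) (h : k <+: s.drop i) :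
    0 ≤ PySem.Chars.find s k ∧ PySem.Chars.find s k ≤ (i : Int) := by
  have h0 : 0 ≤ PySem.Chars.find s k :=
    (PySem.Chars.find_nonneg_iff s k).mpr (h.isInfix.trans (List.drop_suffix i s).isInfix)
  refine ⟨h0, ?_⟩
  by_contra hlt
  exact ((PySem.Chars.find_spec h0).2 i (by omega)) h

lemma pvFindMatch (s k : List Char) (h0 : 0 ≤ PySem.Chars.find s k) :
    k <+: s.drop (PySem.Chars.find s k).toNat :=
  (PySem.Chars.find_spec h0).1

lemma pvFindLt (s k : List Char) (h0 : 0 ≤ PySem.Chars.find s k) (hk : k ≠ []) :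
    (PySem.Chars.find s k).toNat < s.length := by
  have hp := pvFindMatch s k h0
  have hlen : k.length ≤ (s.drop (PySem.Chars.find s k).toNat).length := hp.length_le
  have hfl := PySem.Chars.find_le_length s k
  have hle : (PySem.Chars.find s k).toNat ≤ s.length := Int.toNat_le.mpr hfl
  rcases Nat.eq_or_lt_of_le hle with h | h
  · exfalso
    have hd : (s.drop (PySem.Chars.find s k).toNat).length = 0 := by simp [h]
    exact hk (List.eq_nil_of_length_eq_zero (by omega))
  · exact h

-- the scan step and the first-occurrence step agree once every earlier-found column is present
lemma pvStepEq (s : List Char) (m : Nat) :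
    ∀ (ks : List (List Char × String)) (o : List String),
      (∀ p ∈ ks, p.1 <+: s.drop m → PySem.Chars.find s p.1 ≠ (m : Int) → p.2 ∈ o) →
      pvEvStep s ks o m = pvFsStep s ks o m := by
  intro ks
  induction ks with
  | nil => intro o _; rfl
  | cons p t ih =>
    intro o ho
    by_cases hm : PySem.Chars.find s p.1 = (m : Int)
    · have h0 : 0 ≤ PySem.Chars.find s p.1 := by rw [hm]; exact Int.natCast_nonneg m
      have hpre : p.1 <+: s.drop m := by
        have := pvFindMatch s p.1 h0
        rwa [hm, Int.toNat_natCast] at this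
      simp only [pvEvStep, pvFsStep, List.foldl_cons, if_pos hpre, if_pos hm]
      exact ih (PySem.Set.add o p.2) (fun q hq hq1 hq2 =>
        by simp [PySem.Set.mem_add, ho q (List.mem_cons_of_mem _ hq) hq1 hq2])
    · by_cases hpre : p.1 <+: s.drop m
      · have hmem : p.2 ∈ o := ho p List.mem_cons_self hpre hm
        have hadd : PySem.Set.add o p.2 = o := by
          simp [PySem.Set.add, PySem.Set.contains, hmem]
        simp only [pvEvStep, pvFsStep, List.foldl_cons, if_pos hpre, if_neg hm, hadd]
        exact ih o (fun q hq => ho q (List.mem_cons_of_mem _ hq))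
      · simp only [pvEvStep, pvFsStep, List.foldl_cons, if_neg hpre, if_neg hm]
        exact ih o (fun q hq => ho q (List.mem_cons_of_mem _ hq))

lemma pvFsMono (s : List Char) (m : Nat) :
    ∀ (ks : List (List Char × String)) (o : List String) (x : String), x ∈ o →
      x ∈ pvFsStep s ks o m := by
  intro ks
  induction ks with
  | nil => intro o x hx; exact hx
  | cons p t ih =>
    intro o x hx
    simp only [pvFsStep, List.foldl_cons]
    split
    · exact ih (PySem.Set.add o p.2) x (by simp [PySem.Set.mem_add, hx])
    · exact ih o x hx

lemma pvFsAdds (s : List Char) (m : Nat) :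
    ∀ (ks : List (List Char × String)) (p : List Char × String), p ∈ ks →
      PySem.Chars.find s p.1 = (m : Int) → ∀ o, p.2 ∈ pvFsStep s ks o m := by
  intro ks
  induction ks with
  | nil => intro p hp; exact absurd hp (by simp)
  | cons q t ih =>
    intro p hp hm o
    rcases List.mem_cons.mp hp with h | h
    · subst h
      simp only [pvFsStep, List.foldl_cons, if_pos hm]
      exact pvFsMono s m t _ _ (by simp [PySem.Set.mem_add])
    · simp only [pvFsStep, List.foldl_cons]
      split
      · exact ih p h hm _
      · exact ih p h hm o

lemma pvScanAux (s : List Char) (ks : List (List Char × String)) :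
    ∀ m : Nat,
      ((List.range m).foldl (pvEvStep s ks) [] = (List.range m).foldl (pvFsStep s ks) []) ∧
      (∀ p ∈ ks, 0 ≤ PySem.Chars.find s p.1 → PySem.Chars.find s p.1 < (m : Int) →
        p.2 ∈ (List.range m).foldl (pvFsStep s ks) []) := by
  intro m
  induction m with
  | zero => exact ⟨rfl, fun p _ h0 hlt => absurd hlt (by omega)⟩
  | succ m ih =>
    have hsplit : List.range (m + 1) = List.range m ++ [m] := List.range_succ
    constructor
    · rw [hsplit, List.foldl_append, List.foldl_append, List.foldl_cons, List.foldl_nil,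
        List.foldl_cons, List.foldl_nil, ih.1]
      exact pvStepEq s m ks _ (fun p hp hpre hne => by
        have hle := pvFindLe s p.1 m hpre
        exact ih.2 p hp hle.1 (by omega))
    · intro p hp h0 hlt
      rw [hsplit, List.foldl_append, List.foldl_cons, List.foldl_nil]
      by_cases hm : PySem.Chars.find s p.1 = (m : Int)
      · exact pvFsAdds s m ks p hp hm _
      · exact pvFsMono s m ks _ _ (ih.2 p hp h0 (by omega))

-- fold of one first-occurrence block is the first-occurrence step
lemma pvFoldlBlock (s : List Char) (ks : List (List Char × String)) (m : Nat) (o : List String) :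
    ((pvBlock s ks m).map Prod.snd).foldl PySem.Set.add o = pvFsStep s ks o m := by
  simp only [pvBlock, List.map_map, List.foldl_map, Function.comp, pvFsStep]
  rw [← PySem.List.foldl_ite_eq_foldl_filter
    (p := fun p : List Char × String => PySem.Chars.find s p.1 = (m : Int))
    (f := fun o (p : List Char × String) => PySem.Set.add o p.2)]

lemma pvFirstsScan (s : List Char) (ks : List (List Char × String)) :
    PySem.Set.ofList ((pvFirsts s ks).map Prod.snd) = pvScan s ks := by
  rw [PySem.Set.ofList_eq_foldl]
  simp only [pvFirsts, List.map_flatMap, List.foldl_flatMap]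
  rw [pvScan, (pvScanAux s ks s.length).1]
  exact PySem.List.foldl_congr_mem _ _ _ _ (fun o i _ => pvFoldlBlock s ks i o)

-- permutation machinery
lemma pvFlatMapAppendPerm {a b : Type} (l : List a) (f g : a → List b) :
    (l.flatMap (fun x => f x ++ g x)).Perm (l.flatMap f ++ l.flatMap g) := by
  induction l with
  | nil => simp
  | cons x t ih =>
    simp only [List.flatMap_cons]
    refine (ih.append_left (f x ++ g x)).trans ?_
    simp only [List.append_assoc]
    refine List.Perm.append_left (f x) ?_
    rw [← List.append_assoc, ← List.append_assoc]
    exact (List.perm_append_comm).append_right (t.flatMap g)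

lemma pvRangeFlatMapSingle {b : Type} (n j : Nat) (hj : j < n) (f : Nat → List b)
    (hf : ∀ i, i ≠ j → f i = []) : (List.range n).flatMap f = f j := by
  induction n with
  | zero => omega
  | succ n ih =>
    rw [List.range_succ, List.flatMap_append, List.flatMap_cons, List.flatMap_nil, List.append_nil]
    by_cases h : j = n
    · subst h
      rw [List.flatMap_eq_nil_iff.mpr (fun x hx => hf x (by simp at hx; omega)), List.nil_append]
    · rw [hf n (by omega), List.append_nil]
      exact ih (by omega)

lemma pvBlockSingle (s : List Char) (p : List Char × String) (i : Nat) :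
    pvBlock s [p] i =
      if PySem.Chars.find s p.1 = (i : Int) then [((i : Int), p.2)] else [] := by
  by_cases h : PySem.Chars.find s p.1 = (i : Int) <;> simp [pvBlock, h]

lemma pvSingleKey (s : List Char) (p : List Char × String) (hk : p.1 ≠ []) :
    pvFirsts s [p] =
      if PySem.Chars.find s p.1 ≠ -1 then [(PySem.Chars.find s p.1, p.2)] else [] := by
  by_cases h0 : 0 ≤ PySem.Chars.find s p.1
  · have hne : PySem.Chars.find s p.1 ≠ -1 := by omega
    rw [if_pos hne]
    have hj : (PySem.Chars.find s p.1).toNat < s.length := pvFindLt s p.1 h0 hk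
    rw [pvFirsts, pvRangeFlatMapSingle s.length (PySem.Chars.find s p.1).toNat hj _
      (fun i hi => by
        rw [pvBlockSingle, if_neg]
        intro hc
        exact hi (by omega))]
    rw [pvBlockSingle, if_pos (by omega)]
    congr 1
    rw [Prod.mk.injEq]
    exact ⟨by omega, rfl⟩
  · have hm1 : PySem.Chars.find s p.1 = -1 := by
      have := PySem.Chars.neg_one_le_find s p.1
      omega
    rw [if_neg (by omega), pvFirsts, List.flatMap_eq_nil_iff.mpr]
    intro i _
    rw [pvBlockSingle, if_neg (by omega)]

lemma pvBlockCons (s : List Char) (p : List Char × String) (t : List (List Char × String))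
    (i : Nat) : pvBlock s (p :: t) i = pvBlock s [p] i ++ pvBlock s t i := by
  by_cases h : PySem.Chars.find s p.1 = (i : Int) <;> simp [pvBlock, h]

lemma pvHitsCons (s : List Char) (p : List Char × String) (t : List (List Char × String)) :
    pvHits s (p :: t) =
      (if PySem.Chars.find s p.1 ≠ -1 then [(PySem.Chars.find s p.1, p.2)] else []) ++
        pvHits s t := by
  by_cases h : PySem.Chars.find s p.1 ≠ -1 <;> simp [pvHits, h]

lemma pvPermHits (s : List Char) :
    ∀ ks : List (List Char × String), (∀ p ∈ ks, p.1 ≠ []) →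
      (pvFirsts s ks).Perm (pvHits s ks) := by
  intro ks
  induction ks with
  | nil => intro _; simp [pvFirsts, pvBlock, pvHits]
  | cons p t ih =>
    intro hnil
    have h1 : pvFirsts s (p :: t) = (List.range s.length).flatMap
        (fun i => pvBlock s [p] i ++ pvBlock s t i) := by
      simp only [pvFirsts]
      exact List.flatMap_congr (fun i _ => pvBlockCons s p t i)
    rw [h1, pvHitsCons]
    refine (pvFlatMapAppendPerm (List.range s.length) (pvBlock s [p]) (pvBlock s t)).trans ?_
    have h2 : (List.range s.length).flatMap (pvBlock s [p]) = pvFirsts s [p] := rfl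
    have h3 : (List.range s.length).flatMap (pvBlock s t) = pvFirsts s t := rfl
    rw [h2, h3, pvSingleKey s p (hnil p List.mem_cons_self)]
    exact (ih (fun q hq => hnil q (List.mem_cons_of_mem _ hq))).append_left _

lemma pvBlockFst (s : List Char) (ks : List (List Char × String)) (i : Nat) :
    ∀ x ∈ pvBlock s ks i, x.1 = (i : Int) := by
  intro x hx
  rcases List.mem_map.mp hx with ⟨p, _, hpx⟩
  rw [← hpx]

lemma pvPairwiseConstFst (i : Int) :
    ∀ l : List (Int × String), (∀ x ∈ l, x.1 = i) → l.Pairwise (fun a b => a.1 ≤ b.1) := by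
  intro l
  induction l with
  | nil => exact fun _ => List.Pairwise.nil
  | cons x t ih =>
    intro h
    refine List.pairwise_cons.mpr
      ⟨fun y hy => ?_, ih (fun y hy => h y (List.mem_cons_of_mem _ hy))⟩
    rw [h x List.mem_cons_self, h y (List.mem_cons_of_mem _ hy)]

lemma pvFirstsPairwise (s : List Char) (ks : List (List Char × String)) :
    (pvFirsts s ks).Pairwise (fun a b => a.1 ≤ b.1) := by
  rw [pvFirsts, List.flatMap_def, List.pairwise_flatten]
  constructor
  · intro l' hl'
    rcases List.mem_map.mp hl' with ⟨i, _, hi⟩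
    subst hi
    exact pvPairwiseConstFst (i : Int) _ (pvBlockFst s ks i)
  · rw [List.pairwise_map]
    exact (List.pairwise_lt_range).imp (fun {i j} hij x hx y hy => by
      rw [pvBlockFst s ks i x hx, pvBlockFst s ks j y hy]
      exact_mod_cast Nat.le_of_lt hij)

lemma pvHitsKeyUnique (s : List Char) (ks : List (List Char × String))
    (htie : ∀ p ∈ ks, ∀ q ∈ ks, p.1 <+: q.1 → p.2 = q.2) :
    ∀ a ∈ pvHits s ks, ∀ b ∈ pvHits s ks, a.1 = b.1 → a = b := by
  intro a ha b hb hab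
  rcases List.mem_map.mp ha with ⟨p, hpf, hpa⟩
  rcases List.mem_map.mp hb with ⟨q, hqf, hqb⟩
  have hpks := (List.mem_filter.mp hpf).1
  have hqks := (List.mem_filter.mp hqf).1
  have hpne : PySem.Chars.find s p.1 ≠ -1 := by
    have := (List.mem_filter.mp hpf).2; simpa using this
  have hqne : PySem.Chars.find s q.1 ≠ -1 := by
    have := (List.mem_filter.mp hqf).2; simpa using this
  have hp0 : 0 ≤ PySem.Chars.find s p.1 := by
    have := PySem.Chars.neg_one_le_find s p.1; omega
  have hq0 : 0 ≤ PySem.Chars.find s q.1 := by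
    have := PySem.Chars.neg_one_le_find s q.1; omega
  have hfind : PySem.Chars.find s p.1 = PySem.Chars.find s q.1 := by
    rw [← hpa, ← hqb] at hab; exact hab
  have hpp := pvFindMatch s p.1 hp0
  have hqq := pvFindMatch s q.1 hq0
  rw [hfind] at hpp
  have hcols : p.2 = q.2 := by
    rcases List.prefix_or_prefix_of_prefix hpp hqq with h | h
    · exact htie p hpks q hqks h
    · exact (htie q hqks p hpks h).symm
  rw [← hpa, ← hqb, hfind, hcols]

lemma pvSortedUnique {a : Type} (key : a → Int) :
    ∀ (l₁ l₂ : List a), l₁.Perm l₂ →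
      l₁.Pairwise (fun x y => key x ≤ key y) → l₂.Pairwise (fun x y => key x ≤ key y) →
      (∀ x ∈ l₁, ∀ y ∈ l₁, key x = key y → x = y) → l₁ = l₂ := by
  intro l₁
  induction l₁ with
  | nil => intro l₂ hp _ _ _; exact hp.nil_eq
  | cons x t ih =>
    intro l₂ hp h1 h2 huniq
    cases l₂ with
    | nil => exact absurd hp.symm (by simp)
    | cons y t₂ =>
      have hyx : y = x := by
        have hy1 : y ∈ x :: t := hp.symm.subset List.mem_cons_self
        have hx2 : x ∈ y :: t₂ := hp.subset List.mem_cons_self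
        rcases List.mem_cons.mp hy1 with h | h
        · exact h
        · have hky : key x ≤ key y := (List.pairwise_cons.mp h1).1 y h
          have hkx : key y ≤ key x := by
            rcases List.mem_cons.mp hx2 with h' | h'
            · rw [h']
            · exact (List.pairwise_cons.mp h2).1 x h'
          exact huniq y (List.mem_cons_of_mem _ h) x List.mem_cons_self (by omega)
      subst hyx
      have hpt : t.Perm t₂ := hp.cons_inv
      rw [ih t₂ hpt (List.pairwise_cons.mp h1).2 (List.pairwise_cons.mp h2).2
        (fun u hu v hv => huniq u (List.mem_cons_of_mem _ hu) v (List.mem_cons_of_mem _ hv))]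

lemma pvSortedEqFirsts (s : List Char) (ks : List (List Char × String))
    (hnil : ∀ p ∈ ks, p.1 ≠ [])
    (htie : ∀ p ∈ ks, ∀ q ∈ ks, p.1 <+: q.1 → p.2 = q.2) :
    PySem.List.sorted (pvHits s ks) (fun x => x.1) false = pvFirsts s ks := by
  apply pvSortedUnique (fun x : Int × String => x.1)
  · exact (PySem.List.sorted_perm _ _ _).trans (pvPermHits s ks hnil).symm
  · exact PySem.List.sorted_pairwise _ _
  · exact pvFirstsPairwise s ks
  · intro x hx y hy
    have hx' := (PySem.List.mem_sorted _ _ _ _).mp hx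
    have hy' := (PySem.List.mem_sorted _ _ _ _).mp hy
    exact pvHitsKeyUnique s ks htie x hx' y hy'

lemma pvAddForm (o : List String) (x : String) :
    (if x ∉ o then o ++ [x] else o) = PySem.Set.add o x := by
  by_cases h : x ∈ o <;> simp [PySem.Set.add, PySem.Set.contains, h]

theorem pvMainEq (s : List Char) (ks : List (List Char × String))
    (hnil : ∀ p ∈ ks, p.1 ≠ [])
    (htie : ∀ p ∈ ks, ∀ q ∈ ks, p.1 <+: q.1 → p.2 = q.2) :
    (PySem.List.sorted (pvHits s ks) (fun x => x.1) false).foldl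
      (fun o ic => if ic.2 ∉ o then o ++ [ic.2] else o) [] = pvScan s ks := by
  have h1 : ∀ (l : List (Int × String)) (o : List String),
      l.foldl (fun o ic => if ic.2 ∉ o then o ++ [ic.2] else o) o =
      (l.map Prod.snd).foldl PySem.Set.add o := by
    intro l o
    rw [List.foldl_map]
    exact PySem.List.foldl_congr_mem _ _ _ _ (fun o ic _ => pvAddForm o ic.2)
  rw [h1, ← PySem.Set.ofList_eq_foldl, pvSortedEqFirsts s ks hnil htie, pvFirstsScan]


lemma pvKeysNil : ∀ p ∈ pvKeys true, p.1 ≠ [] := by decide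

lemma pvKeysTie : ∀ p ∈ pvKeys true, ∀ q ∈ pvKeys true, p.1 <+: q.1 → p.2 = q.2 := by decide

lemma pvKeysSub (ctx : Bool) : ∀ p ∈ pvKeys ctx, p ∈ pvKeys true := by
  cases ctx
  · intro p hp
    rcases List.mem_append.mp hp with h | h
    · exact List.mem_append_left _ h
    · simp at h
  · exact fun p hp => hp

lemma pvBeqBridge (nl : String) (i : Nat) (k : String) :
    (PySem.Str.slice nl (some (i : Int)) (some ((i : Int) + (PySem.Str.len k : Int))) = k) ↔
      k.toList <+: nl.toList.drop i := by
  rw [String.ext_iff]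
  simp only [PySem.Str.toList_slice, PySem.Chars.slice_eq_listSlice, PySem.Str.len_eq,
    PySem.List.slice_natCast_add, List.prefix_iff_eq_take]
  exact eq_comm

lemma pvCondAdd (P : Prop) [Decidable P] (o : List String) (x : String) :
    (if P ∧ x ∉ o then o ++ [x] else o) = if P then PySem.Set.add o x else o := by
  by_cases hP : P
  · by_cases hm : x ∈ o <;> simp [hP, hm, PySem.Set.add, PySem.Set.contains]
  · simp [hP]

lemma pvEvStepAppend (s : List Char) (ks1 ks2 : List (List Char × String)) (o : List String)
    (i : Nat) : pvEvStep s (ks1 ++ ks2) o i = pvEvStep s ks2 (pvEvStep s ks1 o i) i :=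
  List.foldl_append

-- A's synonym loop builds exactly the (first index, column) hit list over the synonym keys
lemma pvAfold (nl : String) :
    pvFieldSynonyms.foldl (fun hits kc =>
        let idx := PySem.Str.find nl kc.1
        if idx ≠ -1 then hits ++ [(idx, kc.2)] else hits) [] = pvHits nl.toList pvSyn := by
  have h := PySem.List.foldl_append_ite
    (l := pvSyn) (acc := ([] : List (Int × String)))
    (p := fun p : List Char × String => PySem.Chars.find nl.toList p.1 ≠ -1)
    (f := fun p : List Char × String => (PySem.Chars.find nl.toList p.1, p.2))
  rw [pvHits, show (List.filter (fun p : List Char × String =>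
      decide (PySem.Chars.find nl.toList p.1 ≠ -1)) pvSyn).map
      (fun p : List Char × String => (PySem.Chars.find nl.toList p.1, p.2)) =
      [] ++ (List.filter (fun p : List Char × String =>
      decide (PySem.Chars.find nl.toList p.1 ≠ -1)) pvSyn).map
      (fun p : List Char × String => (PySem.Chars.find nl.toList p.1, p.2)) from rfl, ← h]
  rw [show pvSyn = pvFieldSynonyms.map (fun p : String × String => (p.1.toList, p.2)) from rfl,
    List.foldl_map]
  simp only [PySem.Str.find_eq]

-- B's inner synonym loop is the scan step over the synonym keys
lemma pvBinner (nl : String) (j : Nat) (o : List String) :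
    pvFieldSynonyms.foldl (fun o kc =>
        if PySem.Str.slice nl (some ((j : Nat) : Int))
            (some (((j : Nat) : Int) + (PySem.Str.len kc.1 : Int))) = kc.1 ∧ kc.2 ∉ o then
          o ++ [kc.2] else o) o = pvEvStep nl.toList pvSyn o j := by
  rw [pvEvStep, show pvSyn = pvFieldSynonyms.map (fun p : String × String => (p.1.toList, p.2))
    from rfl, List.foldl_map]
  refine PySem.List.foldl_congr_mem _ _ _ _ (fun acc kc _ => ?_)
  rw [pvCondAdd, if_congr (pvBeqBridge nl j kc.1) rfl rfl]


-- A's special-hint loop extends the hit list exactly to the conditional key list pvKeys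
lemma pvAbody (nl : String) (cb : Bool) (hcb : PySem.Str.isIn "product" nl = cb) :
    pvSpecialHints.foldl (fun hits kcc =>
        let idx := PySem.Str.find nl kcc.1
        if idx ≠ -1 ∧ (kcc.2.2.any fun c => PySem.Str.isIn c nl) then
          hits ++ [(idx, kcc.2.1)] else hits)
      (pvHits nl.toList pvSyn) = pvHits nl.toList (pvKeys cb) := by
  cases cb
  · simp only [pvSpecialHints, List.foldl_cons, List.foldl_nil, List.any_cons, List.any_nil, hcb]
    simp [pvKeys]
  · simp only [pvSpecialHints, List.foldl_cons, List.foldl_nil, List.any_cons, List.any_nil, hcb]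
    by_cases h : PySem.Str.find nl "codes" ≠ -1
    · have h' : ¬ PySem.Chars.find nl.toList ['c','o','d','e','s'] = -1 := by simpa using h
      rw [if_pos (by simp [h'])]
      simp [pvKeys, pvHits, h']
    · have h' : PySem.Chars.find nl.toList ['c','o','d','e','s'] = -1 := by simpa using h
      rw [if_neg (by simp [h'])]
      simp [pvKeys, pvHits, h']


-- a foldl over range(n) as Python ints is a foldl over List.range n
lemma pvPyRangeFoldl {γ : Type} (g : γ → Int → γ) (init : γ) (n : Nat) :
    (PySem.List.pyRange 0 ((n : Int)) 1).foldl g init =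
      List.foldl (fun (o : γ) (j : Nat) => g o ((j : Nat) : Int)) init (List.range n) := by
  simp only [PySem.List.pyRange_zero_natCast]
  rw [List.foldl_map]

-- B's whole scan loop is pvScan over the conditional key list
lemma pvBbody (nl : String) (cb : Bool) (hcb : PySem.Str.isIn "product" nl = cb) :
    (PySem.List.pyRange 0 (PySem.Str.len nl) 1).foldl (fun ordered i =>
      pvSpecialHints.foldl (fun o kcc =>
        if PySem.Str.slice nl (some i) (some (i + (PySem.Str.len kcc.1 : Int))) = kcc.1 ∧
           (kcc.2.2.any fun c => PySem.Str.isIn c nl) ∧ kcc.2.1 ∉ o then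
          o ++ [kcc.2.1] else o)
        (pvFieldSynonyms.foldl (fun o kc =>
          if PySem.Str.slice nl (some i) (some (i + (PySem.Str.len kc.1 : Int))) = kc.1 ∧
             kc.2 ∉ o then
            o ++ [kc.2] else o) ordered)) [] = pvScan nl.toList (pvKeys cb) := by
  have hlen : nl.toList.length = PySem.Str.len nl := by
    simp [PySem.Str.len_eq]
  rw [pvScan, ← hlen, pvPyRangeFoldl]
  refine PySem.List.foldl_congr_mem _ _ _ _ (fun ordered j _ => ?_)
  rw [pvBinner nl j ordered]
  simp only [pvSpecialHints, List.foldl_cons, List.foldl_nil, List.any_cons, List.any_nil]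
  cases cb
  · have hcb' : PySem.Chars.isIn ['p','r','o','d','u','c','t'] nl.toList = false := by
      simpa using hcb
    rw [if_neg (by simp [hcb'])]
    simp [pvKeys, pvEvStep]
  · have hone : (if PySem.Str.slice nl (some ((j : Nat) : Int))
        (some (((j : Nat) : Int) + (PySem.Str.len "codes" : Int))) = "codes" ∧
        ((PySem.Str.isIn "product" nl || false) = true) ∧
        "productCode" ∉ pvEvStep nl.toList pvSyn ordered j then
        pvEvStep nl.toList pvSyn ordered j ++ ["productCode"]
      else pvEvStep nl.toList pvSyn ordered j) =
        pvEvStep nl.toList [("codes".toList, "productCode")]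
          (pvEvStep nl.toList pvSyn ordered j) j := by
      simp only [Bool.or_false, hcb, true_and]
      rw [pvCondAdd]
      unfold pvEvStep
      simp only [List.foldl_cons, List.foldl_nil]
      by_cases hsl : PySem.Str.slice nl (some ((j : Nat) : Int))
          (some (((j : Nat) : Int) + (PySem.Str.len "codes" : Int))) = "codes"
      · rw [if_pos hsl, if_pos ((pvBeqBridge nl j "codes").mp hsl)]
      · rw [if_neg hsl, if_neg (fun hc => hsl ((pvBeqBridge nl j "codes").mpr hc))]
    rw [hone, pvKeys, if_pos rfl, pvEvStepAppend]

-- the two ports agree on every input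
lemma pvProgramsEq (nlq : String) : explicit_field_list_py nlq = explicit_field_list_py_alt nlq := by
  have hor : (if nlq == "" then "" else nlq) = nlq := by
    split
    · next h => exact (eq_of_beq h).symm
    · rfl
  simp only [explicit_field_list_py, explicit_field_list_py_alt, hor]
  by_cases hcue : (PySem.Str.isIn "," (PySem.Str.lower nlq) ∨
      PySem.Str.isIn " and " (PySem.Str.lower nlq) ∨
      PySem.Str.startswith (PySem.Str.lower nlq) "show" ∨
      PySem.Str.startswith (PySem.Str.lower nlq) "list" ∨
      PySem.Str.startswith (PySem.Str.lower nlq) "give" ∨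
      PySem.Str.startswith (PySem.Str.lower nlq) "display")
  · rw [if_neg (not_not_intro hcue), if_neg (not_not_intro hcue)]
    set nl := PySem.Str.lower nlq with hnl
    rw [pvAfold nl]
    rw [pvAbody nl (PySem.Str.isIn "product" nl) rfl]
    rw [pvBbody nl (PySem.Str.isIn "product" nl) rfl]
    have hnil := fun p hp => pvKeysNil p (pvKeysSub (PySem.Str.isIn "product" nl) p hp)
    have htie := fun p hp q hq =>
      pvKeysTie p (pvKeysSub (PySem.Str.isIn "product" nl) p hp)
        q (pvKeysSub (PySem.Str.isIn "product" nl) q hq)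
    by_cases hH : pvHits nl.toList (pvKeys (PySem.Str.isIn "product" nl)) = []
    · rw [if_pos hH, ← pvMainEq _ _ hnil htie, hH]
      rw [show PySem.List.sorted ([] : List (Int × String)) (fun x => x.1) false = []
        from rfl, List.foldl_nil]
    · rw [if_neg hH]
      exact pvMainEq _ _ hnil htie
  · rw [if_pos hcue, if_pos hcue]

-- ===== VERDICT (by name: the statement is the Claim_ definition above) =====
theorem explicit_field_list_py_spec : Claim_equal_explicit_field_list_py := by
  intro nlq _
  unfold Spec_explicit_field_list_py
  exact pvProgramsEq nlq
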